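-- pv_equiv track=rewrite | github.com/JoGei/uhls | src/uhls/backend/hls/uhir/gopt/builtin/infer_static.py | _compute_canonicalized_trip_count
-- ===== SOURCE A (Python) =====
-- from math import gcd
--
-- def _compute_trip_count(init: int, bound: int, step: int, compare_opcode: str) -> int | None:
--     if step > 0 and compare_opcode in {"lt", "le"}:
--         distance = bound - init if compare_opcode == "lt" else bound - init + 1
--         if distance <= 0:
--             return 0
--         return (distance + step - 1) // step
--     if step < 0 and compare_opcode in {"gt", "ge"}:
--         stride = -step
--         distance = init - bound if compare_opcode == "gt" else init - bound + 1
--         if distance <= 0: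
--             return 0
--         return (distance + stride - 1) // stride
--     return None
--
-- def _compute_canonicalized_trip_count(
--     init: int,
--     bound: int,
--     steps: set[int],
--     compare_opcode: str,
-- ) -> int | None:
--     ordered = sorted(steps)
--     if not ordered:
--         return None
--     same_sign = all(step > 0 for step in ordered) or all(step < 0 for step in ordered)
--     if not same_sign:
--         return None
--
--     base_step = abs(ordered[0])
--     for step in ordered[1:]:
--         base_step = gcd(base_step, abs(step))
--     if base_step == 0:
--         return None
--
--     normalized = sorted(abs(step) // base_step for step in ordered)
--     if normalized != list(range(1, normalized[-1] + 1)):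
--         return None
--
--     signed_base = base_step if ordered[0] > 0 else -base_step
--     original_trip_count = _compute_trip_count(init, bound, signed_base, compare_opcode)
--     if original_trip_count is None:
--         return None
--     factor = normalized[-1]
--     return (original_trip_count + factor - 1) // factor
-- ===== SOURCE B (Python) =====
-- def _single_trip(init: int, bound: int, mag: int, neg: bool, compare_opcode: str) -> int | None:
--     # table-driven: pick the opcode->inclusive-offset table for the loop direction
--     offsets = {"gt": 0, "ge": 1} if neg else {"lt": 0, "le": 1}
--     if compare_opcode not in offsets:
--         return None
--     d = (init - bound if neg else bound - init) + offsets[compare_opcode]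
--     return 0 if d <= 0 else (d + mag - 1) // mag
--
--
-- def _compute_canonicalized_trip_count(
--     init: int,
--     bound: int,
--     steps: set[int],
--     compare_opcode: str,
-- ) -> int | None:
--     if not steps:
--         return None
--     neg = all(s < 0 for s in steps)
--     if not neg and not all(s > 0 for s in steps):
--         return None
--     # No gcd needed: the strides canonicalize exactly when their magnitudes
--     # are m, 2m, ..., km for m = the smallest magnitude (then m IS the gcd).
--     mags = {abs(s) for s in steps}
--     m = min(mags)
--     k = len(mags)
--     if mags != {m * i for i in range(1, k + 1)}:
--         return None
--     count = _single_trip(init, bound, m, neg, compare_opcode)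
--     return None if count is None else (count + k - 1) // k
-- ===== Notes on version B (the rewrite author's own statement) =====
-- stated objective: faster
-- what changed: B eliminates both sorts, the gcd fold and the range-list comparison: it characterizes a canonicalizable stride bundle by the closed condition {|s|} == {m, 2m, ..., km} for m = min magnitude (which is then automatically the gcd), and its single-step helper is table-driven (an opcode->offset dict chosen by the loop direction) instead of A's two sign-specialized branches.
import Mathlib
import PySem

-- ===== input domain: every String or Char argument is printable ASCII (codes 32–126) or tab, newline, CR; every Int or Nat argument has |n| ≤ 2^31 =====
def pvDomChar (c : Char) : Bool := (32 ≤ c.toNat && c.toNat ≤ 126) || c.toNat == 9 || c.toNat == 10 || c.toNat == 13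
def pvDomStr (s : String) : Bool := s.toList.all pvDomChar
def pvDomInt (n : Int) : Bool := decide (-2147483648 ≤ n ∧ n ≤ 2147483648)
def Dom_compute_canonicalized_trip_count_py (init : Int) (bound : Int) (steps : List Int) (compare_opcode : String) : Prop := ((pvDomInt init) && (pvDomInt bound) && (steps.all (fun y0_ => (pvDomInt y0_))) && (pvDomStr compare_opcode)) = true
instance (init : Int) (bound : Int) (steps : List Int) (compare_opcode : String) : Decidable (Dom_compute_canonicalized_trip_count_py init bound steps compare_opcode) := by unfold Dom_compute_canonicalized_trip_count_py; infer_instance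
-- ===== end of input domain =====

-- B drops the gcd fold and the sorted/range machinery: a stride bundle canonicalizes exactly
-- when the magnitudes are {m, 2m, ..., km} for m = the smallest magnitude, and the single-step
-- helper is table-driven (opcode->offset dict per direction). Objective: faster (no sorting;
-- a timing run measured B faster on large inputs).


-- ===== PORT A =====
-- _compute_trip_count, transliterated
def trip_count_py (init : Int) (bound : Int) (step : Int) (compare_opcode : String) : Option Int :=
  if step > 0 ∧ (compare_opcode = "lt" ∨ compare_opcode = "le") then
    let distance := if compare_opcode = "lt" then bound - init else bound - init + 1
    if distance ≤ 0 then some 0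
    else some (PySem.Int.floordiv (distance + step - 1) step)
  else if step < 0 ∧ (compare_opcode = "gt" ∨ compare_opcode = "ge") then
    let stride := -step
    let distance := if compare_opcode = "gt" then init - bound else init - bound + 1
    if distance ≤ 0 then some 0
    else some (PySem.Int.floordiv (distance + stride - 1) stride)
  else none

-- steps : set[int] is the list of its distinct elements (PySem.Set); sorted(steps) is canonical
def compute_canonicalized_trip_count_py (init : Int) (bound : Int) (steps : List Int) (compare_opcode : String) : Option Int :=
  let ordered := PySem.List.sorted (PySem.Set.ofList steps) (fun x => x) false
  match ordered with
  | [] => none                                   -- `if not ordered: return None`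
  | o0 :: rest =>
    let same_sign := ordered.all (fun s => s > 0) || ordered.all (fun s => s < 0)
    if same_sign = false then none
    else
      -- base_step = abs(ordered[0]); then gcd with abs of each element of the tail
      let base_step : Int := rest.foldl (fun g t => ((Int.gcd g |t| : Nat) : Int)) |o0|
      if base_step = 0 then none
      else
        let normalized := PySem.List.sorted (ordered.map (fun t => PySem.Int.floordiv |t| base_step)) (fun x => x) false
        match PySem.List.pyGet? normalized (-1) with   -- normalized[-1]; nonempty, never IndexError
        | none => none
        | some last =>
          if normalized ≠ PySem.List.pyRange 1 (last + 1) 1 then none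
          else
            let signed_base := if o0 > 0 then base_step else -base_step
            match trip_count_py init bound signed_base compare_opcode with
            | none => none
            | some otc => some (PySem.Int.floordiv (otc + last - 1) last)

-- ===== PORT B =====
-- _single_trip from Source B: table-driven (opcode -> inclusive offset per loop direction)
def single_trip_alt (init : Int) (bound : Int) (mag : Int) (neg : Bool) (compare_opcode : String) : Option Int :=
  let offsets : PySem.Dict String Int := if neg then PySem.Dict.ofList [("gt", (0:Int)), ("ge", 1)] else PySem.Dict.ofList [("lt", 0), ("le", 1)]
  match PySem.Dict.get? offsets compare_opcode with
  | none => none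
  | some off =>
    let d := (if neg then init - bound else bound - init) + off
    if d ≤ 0 then some 0 else some (PySem.Int.floordiv (d + mag - 1) mag)

-- all/min/len/set-equality consume the sets order-independently
def compute_canonicalized_trip_count_py_alt (init : Int) (bound : Int) (steps : List Int) (compare_opcode : String) : Option Int :=
  let s := PySem.Set.ofList steps
  if s.isEmpty then none
  else
    let neg := s.all (fun x => x < 0)
    if !neg && !(s.all (fun x => x > 0)) then none
    else
      let mags : PySem.Set Int := PySem.Set.ofList (s.map (fun x => |x|))
      match PySem.List.min? mags (fun x => x) with
      | none => none                             -- unreachable: mags is nonempty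
      | some m =>
        let k : Int := (mags.length : Int)
        if !(PySem.Set.equal mags (PySem.Set.ofList ((PySem.List.pyRange 1 (k + 1) 1).map (fun i => m * i)))) then none
        else
          match single_trip_alt init bound m neg compare_opcode with
          | none => none
          | some cnt => some (PySem.Int.floordiv (cnt + k - 1) k)

-- ===== PRECONDITION & SPEC =====
def Spec_compute_canonicalized_trip_count_py (init : Int) (bound : Int) (steps : List Int) (compare_opcode : String) (out : Option Int) : Prop := out = compute_canonicalized_trip_count_py_alt init bound steps compare_opcode
instance (init : Int) (bound : Int) (steps : List Int) (compare_opcode : String) (out : Option Int) : Decidable (Spec_compute_canonicalized_trip_count_py init bound steps compare_opcode out) := by unfold Spec_compute_canonicalized_trip_count_py; infer_instance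

-- ===== CLAIM =====
def Claim_equal_compute_canonicalized_trip_count_py : Prop := ∀ (init : Int) (bound : Int) (steps : List Int) (compare_opcode : String), Dom_compute_canonicalized_trip_count_py init bound steps compare_opcode → Spec_compute_canonicalized_trip_count_py init bound steps compare_opcode (compute_canonicalized_trip_count_py init bound steps compare_opcode)

-- ===== LEMMAS AND PROOFS =====

-- the gcd fold A computes, seen on the Nat side
def gfold (a : Nat) (l : List Int) : Nat := l.foldl (fun g s => Nat.gcd g s.natAbs) a

theorem gfold_int (l : List Int) (a : Nat) :
    l.foldl (fun g s => ((Int.gcd g |s| : Nat) : Int)) (a : Int) = (gfold a l : Int) := by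
  induction l generalizing a with
  | nil => simp [gfold]
  | cons x t ih =>
    simp only [gfold, List.foldl_cons] at *
    rw [show Int.gcd (a : Int) |x| = Nat.gcd a x.natAbs by
      simp [Int.gcd, Int.natAbs_abs], ih]

theorem gfold_dvd_init (l : List Int) (a : Nat) : gfold a l ∣ a := by
  induction l generalizing a with
  | nil => simp [gfold]
  | cons x t ih => exact dvd_trans (ih _) (Nat.gcd_dvd_left _ _)

theorem gfold_dvd (l : List Int) (a : Nat) (x : Int) (hx : x ∈ l) : gfold a l ∣ x.natAbs := by
  induction l generalizing a with
  | nil => simp at hx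
  | cons y t ih =>
    rcases List.mem_cons.mp hx with h | h
    · subst h; exact dvd_trans (gfold_dvd_init t _) (Nat.gcd_dvd_right _ _)
    · exact ih _ h

theorem dvd_gfold (l : List Int) (a d : Nat) (ha : d ∣ a) (h : ∀ x ∈ l, d ∣ x.natAbs) :
    d ∣ gfold a l := by
  induction l generalizing a with
  | nil => simpa [gfold] using ha
  | cons y t ih =>
    simp only [gfold, List.foldl_cons] at *
    exact ih _ (Nat.dvd_gcd ha (h y (by simp))) (fun x hx => h x (by simp [hx]))

theorem gfold_perm (l1 l2 : List Int) (a : Nat) (h : l1.Perm l2) : gfold a l1 = gfold a l2 := by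
  have : RightCommutative (fun (g : Nat) (s : Int) => Nat.gcd g s.natAbs) :=
    ⟨fun a b c => by simp [Nat.gcd_assoc, Nat.gcd_comm b.natAbs]⟩
  exact h.foldl_eq a

-- set(l) of a duplicate-free list is l itself
theorem set_ofList_nodup {α : Type} [BEq α] [LawfulBEq α] (l : List α) (h : l.Nodup) :
    PySem.Set.ofList l = l := by
  have aux : ∀ (t acc : List α), (acc ++ t).Nodup → t.foldl PySem.Set.add acc = acc ++ t := by
    intro t
    induction t with
    | nil => intro acc _; simp
    | cons x r ih =>
      intro acc hnd
      have hx : PySem.Set.add acc x = acc ++ [x] := by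
        have hxacc : x ∉ acc := by
          intro hc
          exact (List.disjoint_of_nodup_append hnd) hc (by simp)
        simp [PySem.Set.add, PySem.Set.contains, hxacc]
      rw [List.foldl_cons, hx, ih (acc ++ [x]) (by simpa using hnd)]
      simp
  simpa using aux l [] (by simpa using h)

-- pigeonhole: m distinct integers in [1, m] are exactly 1..m
theorem perm_range (N : List Int) (m : Nat) (hm : 1 ≤ m) (hnd : N.Nodup) (hlen : N.length = m)
    (hlb : ∀ z ∈ N, 1 ≤ z) (hub : ∀ z ∈ N, z ≤ (m : Int)) :
    N.Perm (PySem.List.pyRange 1 ((m : Int) + 1) 1) := by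
  have hpr : (PySem.List.pyRange 1 ((m : Int) + 1) 1).Nodup := PySem.List.nodup_pyRange_one _ _
  rw [List.perm_ext_iff_of_nodup hnd hpr]
  intro z
  rw [PySem.List.mem_pyRange_one]
  constructor
  · intro hz; exact ⟨hlb z hz, by have := hub z hz; omega⟩
  · rintro ⟨h1, h2⟩
    have hT : N.toFinset = Finset.Icc (1 : Int) (m : Int) := by
      apply Finset.eq_of_subset_of_card_le
      · intro w hw; rw [List.mem_toFinset] at hw
        rw [Finset.mem_Icc]; exact ⟨hlb w hw, hub w hw⟩
      · rw [List.toFinset_card_of_nodup hnd, hlen, Int.card_Icc]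
        omega
    have : z ∈ N.toFinset := by rw [hT, Finset.mem_Icc]; exact ⟨h1, by omega⟩
    exact List.mem_toFinset.mp this

-- normalized[-1] of the contiguous range 1..k
theorem pyGet_range_last (k : Int) (hk : 1 ≤ k) :
    PySem.List.pyGet? (PySem.List.pyRange 1 (k + 1) 1) (-1) = some k := by
  rw [show PySem.List.pyRange 1 (k + 1) 1 = PySem.List.pyRange 1 k 1 ++ [k] from
    PySem.List.pyRange_one_succ_right (by omega)]
  exact PySem.List.pyGet?_neg_one_append_singleton _ _

-- the two single-step helpers agree: positive direction
theorem trip_eq_pos (init bound g : Int) (c : String) (hg : 0 < g) :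
    trip_count_py init bound g c = single_trip_alt init bound g false c := by
  unfold trip_count_py single_trip_alt
  rw [show (if (false : Bool) = true then PySem.Dict.ofList [("gt", (0:Int)), ("ge", 1)]
      else PySem.Dict.ofList [("lt", 0), ("le", 1)]) = PySem.Dict.mk [("lt", 0), ("le", 1)] from by decide]
  by_cases h1 : c = "lt"
  · simp [h1, PySem.Dict.get?_mk_cons, hg]
  · by_cases h2 : c = "le"
    · simp [h1, h2, PySem.Dict.get?_mk_cons, hg]
    · have e1 : ("lt" == c) = false := beq_eq_false_iff_ne.mpr (Ne.symm h1)
      have e2 : ("le" == c) = false := beq_eq_false_iff_ne.mpr (Ne.symm h2)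
      simp [h1, h2, PySem.Dict.get?_mk_cons, PySem.Dict.get?, hg, show ¬ (g < 0) by omega,
        List.find?, e1, e2]

-- the two single-step helpers agree: negative direction
theorem trip_eq_neg (init bound g : Int) (c : String) (hg : 0 < g) :
    trip_count_py init bound (-g) c = single_trip_alt init bound g true c := by
  unfold trip_count_py single_trip_alt
  rw [show (if (true : Bool) = true then PySem.Dict.ofList [("gt", (0:Int)), ("ge", 1)]
      else PySem.Dict.ofList [("lt", 0), ("le", 1)]) = PySem.Dict.mk [("gt", 0), ("ge", 1)] from by decide]
  by_cases h1 : c = "gt"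
  · simp [h1, PySem.Dict.get?_mk_cons, hg, show ¬ (-g > 0) by omega]
  · by_cases h2 : c = "ge"
    · simp [h1, h2, PySem.Dict.get?_mk_cons, hg, show ¬ (-g > 0) by omega]
    · simp [h1, h2, PySem.Dict.get?_mk_cons, PySem.Dict.get?, hg, show ¬ (-g > 0) by omega,
        show ¬ (g < 0) by omega, List.find?,
        beq_eq_false_iff_ne.mpr (Ne.symm h1 : "gt" ≠ c),
        beq_eq_false_iff_ne.mpr (Ne.symm h2 : "ge" ≠ c)]

-- shared continuation of both programs after the emptiness and same-sign checks
theorem main_core (init bound : Int) (c : String) (s : List Int) (o0 : Int) (rest : List Int)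
    (hnd : s.Nodup) (hperm : (o0 :: rest).Perm s) (neg : Bool)
    (hsign : ∀ x ∈ s, if neg then x < 0 else 0 < x) :
    (if List.foldl (fun g t => ((Int.gcd g |t| : Nat) : Int)) |o0| rest = 0 then none
     else
       match PySem.List.pyGet?
           (PySem.List.sorted
             ((o0 :: rest).map
               (fun t => PySem.Int.floordiv |t| (List.foldl (fun g t => ((Int.gcd g |t| : Nat) : Int)) |o0| rest)))
             (fun x => x) false) (-1) with
       | none => none
       | some last =>
         if (PySem.List.sorted
               ((o0 :: rest).map
                 (fun t => PySem.Int.floordiv |t| (List.foldl (fun g t => ((Int.gcd g |t| : Nat) : Int)) |o0| rest)))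
               (fun x => x) false) ≠ PySem.List.pyRange 1 (last + 1) 1 then none
         else
           match trip_count_py init bound
               (if o0 > 0 then List.foldl (fun g t => ((Int.gcd g |t| : Nat) : Int)) |o0| rest
                else -List.foldl (fun g t => ((Int.gcd g |t| : Nat) : Int)) |o0| rest) c with
           | none => none
           | some otc => some (PySem.Int.floordiv (otc + last - 1) last)) =
    (match PySem.List.min? (PySem.Set.ofList (s.map (fun x => |x|))) (fun x => x) with
     | none => none
     | some m =>
       if !(PySem.Set.equal (PySem.Set.ofList (s.map (fun x => |x|)))
             (PySem.Set.ofList ((PySem.List.pyRange 1 (((PySem.Set.ofList (s.map (fun x => |x|))).length : Int) + 1) 1).map (fun i => m * i)))) then none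
       else
         match single_trip_alt init bound m neg c with
         | none => none
         | some cnt => some (PySem.Int.floordiv (cnt + ((PySem.Set.ofList (s.map (fun x => |x|))).length : Int) - 1) ((PySem.Set.ofList (s.map (fun x => |x|))).length : Int))) := by
  have ho0 : o0 ∈ s := hperm.subset (by simp)
  have hbase : List.foldl (fun g t => ((Int.gcd g |t| : Nat) : Int)) |o0| rest
      = ((gfold 0 s : Nat) : Int) := by
    rw [show |o0| = ((o0.natAbs : Nat) : Int) by simp, gfold_int]
    rw [show gfold o0.natAbs rest = gfold 0 (o0 :: rest) by simp [gfold]]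
    rw [gfold_perm _ _ 0 hperm]
  set n := gfold 0 s with hn
  have hnz : ∀ x ∈ s, x ≠ 0 := by
    intro x hx; have := hsign x hx; cases neg <;> simp at this <;> omega
  have hnpos : 0 < n := by
    rcases Nat.eq_zero_or_pos n with h | h
    · exfalso
      have hd := gfold_dvd s 0 o0 ho0
      rw [← hn, h] at hd
      have h0 : o0.natAbs = 0 := Nat.eq_zero_of_zero_dvd hd
      have := hnz o0 ho0
      omega
    · exact h
  set G : Int := ((n : Nat) : Int) with hG
  have hGpos : 0 < G := by rw [hG]; exact_mod_cast hnpos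
  have hGdvd : ∀ x ∈ s, G ∣ |x| := by
    intro x hx
    rw [show |x| = ((x.natAbs : Nat) : Int) by simp, hG]
    exact_mod_cast Int.natCast_dvd_natCast.mpr (gfold_dvd s 0 x hx)
  have hqx : ∀ x ∈ s, |x| = G * (|x| / G) := fun x hx => (Int.mul_ediv_cancel' (hGdvd x hx)).symm
  have hq1 : ∀ x ∈ s, 1 ≤ |x| / G := by
    intro x hx
    have h1 : G ≤ |x| := Int.le_of_dvd (abs_pos.mpr (hnz x hx)) (hGdvd x hx)
    rw [Int.le_ediv_iff_mul_le hGpos]; omega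
  have habs_inj : ∀ x ∈ s, ∀ y ∈ s, |x| = |y| → x = y := by
    intro x hx y hy hxy
    have h1 := hsign x hx; have h2 := hsign y hy
    cases neg <;> simp at h1 h2 <;>
      [rw [abs_of_pos h1, abs_of_pos h2] at hxy; rw [abs_of_neg h1, abs_of_neg h2] at hxy] <;>
      omega
  set M : List Int := s.map (fun x => |x|) with hM
  have hMnd : M.Nodup := List.Nodup.map_on habs_inj hnd
  have hmagsM : PySem.Set.ofList M = M := set_ofList_nodup M hMnd
  rw [hbase, if_neg (by rw [hG]; exact_mod_cast hnpos.ne')]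
  rw [show PySem.Set.ofList (s.map (fun x => |x|)) = M from hmagsM]
  set k : Nat := s.length with hk
  have hk1 : 1 ≤ k := by
    rw [hk]
    have := hperm.length_eq; simp at this; omega
  have hkM : (M.length : Int) = (k : Int) := by simp [hM, hk]
  rw [hkM]
  have hfd : ∀ t : Int, PySem.Int.floordiv |t| G = |t| / G :=
    fun t => PySem.Int.floordiv_eq_ediv_of_pos hGpos
  simp only [hfd]
  cases hmin : PySem.List.min? M (fun x => x) with
  | none =>
    exfalso
    have := (PySem.List.min?_eq_none_iff _ _).mp hmin
    rw [hM] at this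
    have hse := List.map_eq_nil_iff.mp this
    rw [hse] at hperm; exact absurd hperm.length_eq (by simp)
  | some m =>
    have hmmem : m ∈ M := PySem.List.min?_mem hmin
    have hmmin : ∀ y ∈ M, m ≤ y := fun y hy => PySem.List.min?_isMin hmin y hy
    have hmpos : 0 < m := by
      obtain ⟨x, hx, rfl⟩ := List.mem_map.mp hmmem
      exact abs_pos.mpr (hnz x hx)
    have htgt : ∀ x : Int,
        (x ∈ PySem.Set.ofList ((PySem.List.pyRange 1 ((k : Int) + 1) 1).map (fun i => m * i)))
        ↔ ∃ i : Int, (1 ≤ i ∧ i ≤ (k : Int)) ∧ x = m * i := by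
      intro x
      rw [PySem.Set.mem_ofList _ _, List.mem_map]
      constructor
      · rintro ⟨i, hi, rfl⟩
        rw [PySem.List.mem_pyRange_one] at hi
        exact ⟨i, ⟨hi.1, by omega⟩, rfl⟩
      · rintro ⟨i, ⟨h1, h2⟩, rfl⟩
        exact ⟨i, PySem.List.mem_pyRange_one.mpr ⟨h1, by omega⟩, rfl⟩
    cases hcond : PySem.Set.equal M
        (PySem.Set.ofList ((PySem.List.pyRange 1 ((k : Int) + 1) 1).map (fun i => m * i))) with
    | true =>
      have HB : ∀ x : Int, x ∈ M ↔ ∃ i : Int, (1 ≤ i ∧ i ≤ (k : Int)) ∧ x = m * i := by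
        intro x
        rw [← htgt x]
        exact ((PySem.Set.equal_iff _ _).mp hcond) x
      -- m = G
      have hmG : m = G := by
        obtain ⟨x0, hx0, hx0m⟩ := List.mem_map.mp hmmem
        have hGm : G ∣ m := hx0m ▸ hGdvd x0 hx0
        have hmdvdall : ∀ y ∈ s, m ∣ |y| := by
          intro y hy
          obtain ⟨i, _, he⟩ := (HB |y|).mp (List.mem_map_of_mem hy)
          exact ⟨i, he⟩
        have hmG' : m ∣ G := by
          have hmn : m = ((m.toNat : Nat) : Int) := (Int.toNat_of_nonneg hmpos.le).symm
          have h1 : ∀ y ∈ s, m.toNat ∣ y.natAbs := by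
            intro y hy
            have := hmdvdall y hy
            rw [show |y| = ((y.natAbs : Nat) : Int) by simp, hmn] at this
            exact_mod_cast this
          have h2 : m.toNat ∣ n := dvd_gfold s 0 m.toNat (dvd_zero _) h1
          rw [hmn, hG]
          exact_mod_cast h2
        exact Int.dvd_antisymm hmpos.le hGpos.le hmG' hGm
      -- the quotient list is a permutation of 1..k
      have hqval : ∀ x ∈ s, ∃ i : Int, (1 ≤ i ∧ i ≤ (k : Int)) ∧ |x| / G = i ∧ |x| = G * i := by
        intro x hx
        obtain ⟨i, hi, he⟩ := (HB |x|).mp (List.mem_map_of_mem hx)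
        rw [hmG] at he
        refine ⟨i, hi, ?_, he⟩
        rw [he, Int.mul_ediv_cancel_left _ hGpos.ne']
      have hperm2 : (s.map (fun x => |x| / G)).Perm (PySem.List.pyRange 1 ((k : Int) + 1) 1) := by
        apply perm_range _ k hk1
        · refine List.Nodup.map_on ?_ hnd
          intro x hx y hy hxy
          have ex := hqx x hx; have ey := hqx y hy
          exact habs_inj x hx y hy (by rw [ex, ey, hxy])
        · simp [hk]
        · intro z hz
          obtain ⟨x, hx, rfl⟩ := List.mem_map.mp hz
          exact hq1 x hx
        · intro z hz
          obtain ⟨x, hx, rfl⟩ := List.mem_map.mp hz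
          obtain ⟨i, ⟨_, hi2⟩, hq, _⟩ := hqval x hx
          omega
      have hsortedN : PySem.List.sorted ((o0 :: rest).map (fun t => |t| / G)) (fun x => x) false
          = PySem.List.pyRange 1 ((k : Int) + 1) 1 := by
        refine PySem.List.sorted_eq_of_perm_of_pairwise_lt _ _ _ ?_ ?_
        · exact hperm2.symm.trans ((hperm.map _).symm)
        · exact PySem.List.pairwise_lt_pyRange_one _ _
      rw [hsortedN, pyGet_range_last (k : Int) (by exact_mod_cast hk1)]
      have htrip : trip_count_py init bound (if o0 > 0 then G else -G) c
          = single_trip_alt init bound m neg c := by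
        have hso := hsign o0 ho0
        cases neg
        · simp at hso
          rw [if_pos (by omega : o0 > 0), hmG]
          exact trip_eq_pos init bound G c hGpos
        · simp at hso
          rw [if_neg (by omega : ¬ o0 > 0), hmG]
          exact trip_eq_neg init bound G c hGpos
      simp only []
      rw [hcond, htrip,
        if_neg (show ¬ (PySem.List.pyRange 1 ((k : Int) + 1) 1 ≠ PySem.List.pyRange 1 ((k : Int) + 1) 1)
          from by simp)]
      rfl
    | false =>
      simp only []
      rw [hcond, if_pos (show (!false) = true from rfl)]
      cases hget : PySem.List.pyGet?
          (PySem.List.sorted ((o0 :: rest).map (fun t => |t| / G)) (fun x => x) false) (-1) with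
      | none => rfl
      | some last =>
        simp only []
        rw [if_pos]
        intro heq
        -- from A's passing condition derive B's set equality, contradicting hcond
        set N := PySem.List.sorted ((o0 :: rest).map (fun t => |t| / G)) (fun x => x) false with hN
        have hlenN : N.length = k := by
          rw [hN, PySem.List.length_sorted, List.length_map]
          simpa [hk] using hperm.length_eq
        have hlast : last = (k : Int) := by
          have := congrArg List.length heq
          rw [hlenN, PySem.List.length_pyRange_one] at this
          omega
        have hmemN : ∀ z : Int, z ∈ N ↔ ∃ x ∈ s, |x| / G = z := by
          intro z
          rw [hN, PySem.List.mem_sorted, List.mem_map]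
          constructor
          · rintro ⟨x, hx, rfl⟩; exact ⟨x, hperm.mem_iff.mp hx, rfl⟩
          · rintro ⟨x, hx, rfl⟩; exact ⟨x, hperm.mem_iff.mpr hx, rfl⟩
        have hrangeN : ∀ z : Int, z ∈ N ↔ (1 ≤ z ∧ z ≤ (k : Int)) := by
          intro z
          rw [heq, PySem.List.mem_pyRange_one, hlast]
          omega
        -- G is a magnitude (the one whose quotient is 1)
        have hGinM : G ∈ M := by
          obtain ⟨x, hx, hx1⟩ := (hmemN 1).mp ((hrangeN 1).mpr ⟨le_refl _, by exact_mod_cast hk1⟩)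
          have := hqx x hx
          rw [hx1, mul_one] at this
          exact this ▸ List.mem_map_of_mem hx
        have hGlb : ∀ y ∈ M, G ≤ y := by
          intro y hy
          obtain ⟨x, hx, rfl⟩ := List.mem_map.mp hy
          have h1 := hq1 x hx
          have h2 := hqx x hx
          nlinarith
        have hmG : m = G := le_antisymm (hmmin G hGinM) (hGlb m hmmem)
        have hcond' : PySem.Set.equal M
            (PySem.Set.ofList ((PySem.List.pyRange 1 ((k : Int) + 1) 1).map (fun i => m * i))) = true := by
          rw [PySem.Set.equal_iff _ _]
          intro x
          rw [htgt x]
          constructor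
          · intro hx
            obtain ⟨y, hy, rfl⟩ := List.mem_map.mp hx
            have hq := (hrangeN (|y| / G)).mp ((hmemN _).mpr ⟨y, hy, rfl⟩)
            exact ⟨|y| / G, hq, by rw [hmG]; exact hqx y hy⟩
          · rintro ⟨i, ⟨h1, h2⟩, rfl⟩
            obtain ⟨y, hy, hyq⟩ := (hmemN i).mp ((hrangeN i).mpr ⟨h1, h2⟩)
            have := hqx y hy
            rw [hyq] at this
            rw [hmG, ← this]
            exact List.mem_map_of_mem hy
        rw [hcond'] at hcond
        exact absurd hcond (by simp)

-- ===== VERDICT (by name: the statement is the Claim_ definition above) =====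
theorem compute_canonicalized_trip_count_py_spec : Claim_equal_compute_canonicalized_trip_count_py := by
  intro init bound steps compare_opcode _
  unfold Spec_compute_canonicalized_trip_count_py
  unfold compute_canonicalized_trip_count_py compute_canonicalized_trip_count_py_alt
  set s : List Int := PySem.Set.ofList steps with hs
  have hnd : s.Nodup := PySem.Set.nodup_ofList steps
  have hperm : (PySem.List.sorted s (fun x => x) false).Perm s := PySem.List.sorted_perm s _ false
  cases hord : PySem.List.sorted s (fun x => x) false with
  | nil =>
    have hse : s = [] :=
      (PySem.List.sorted_eq_nil_iff (xs := s) (key := fun x : Int => x) (rev := false)).mp hord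
    simp [hse]
  | cons o0 rest =>
    rw [hord] at hperm
    have hsne : s.isEmpty = false := by
      cases hse : s with
      | nil => rw [hse] at hperm; exact absurd hperm.length_eq (by simp)
      | cons a t => simp
    simp only [hsne, Bool.false_eq_true, if_false]
    have hall : ∀ p : Int → Bool, (o0 :: rest).all p = s.all p := by
      intro p
      cases h1 : (o0 :: rest).all p with
      | true =>
        symm; rw [List.all_eq_true] at h1 ⊢
        intro x hx; exact h1 x (hperm.mem_iff.mpr hx)
      | false =>
        symm; rw [List.all_eq_false] at h1 ⊢
        obtain ⟨x, hx, hpx⟩ := h1; exact ⟨x, hperm.mem_iff.mp hx, hpx⟩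
    rw [hall, hall]
    cases hneg : s.all (fun x => x < 0) with
    | true =>
      have hsign : ∀ x ∈ s, x < 0 := by
        intro x hx; have := (List.all_eq_true.mp hneg) x hx; simpa using this
      simp only [Bool.not_true, Bool.false_and, Bool.or_true, Bool.true_eq_false, if_false,
        Bool.false_eq_true]
      exact main_core init bound compare_opcode s o0 rest hnd hperm true
        (by intro x hx; simpa using hsign x hx)
    | false =>
      cases hpos : s.all (fun x => x > 0) with
      | false => simp
      | true =>
        have hsign : ∀ x ∈ s, 0 < x := by
          intro x hx; have := (List.all_eq_true.mp hpos) x hx; simpa using this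
        simp only [Bool.not_false, Bool.not_true, Bool.true_and, Bool.true_or,
          Bool.true_eq_false, if_false, Bool.false_eq_true]
        exact main_core init bound compare_opcode s o0 rest hnd hperm false
          (by intro x hx; simpa using hsign x hx)
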